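-- pv_equiv track=rewrite | github.com/voltgizerz/CodeWarsSolutions | 7 kyu - Beginner/7 kyu - Put a Letter in a Column/solve.py | build_row_text
-- ===== SOURCE A (Python) =====
-- def build_row_text(index, character):
--     ans = ""
--     for i in range(9):
--         if i!=index:
--             ans+="| "
--         else:
--             ans+=f"|{character}"
--     return ans+"|"
-- ===== SOURCE B (Python) =====
-- def build_row_text(index, character):
--     if 0 <= index < 9:
--         return "| " * index + "|" + character + "| " * (8 - index) + "|"
--     return "| " * 9 + "|"
-- ===== Notes on version B (the rewrite author's own statement) =====
-- stated objective: simpler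
-- what changed: Replaced the 9-iteration loop with a per-step equality test by a closed-form string expression: repeated '| ' segments on each side of the character, with a single range test for out-of-range indices.
import Mathlib
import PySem

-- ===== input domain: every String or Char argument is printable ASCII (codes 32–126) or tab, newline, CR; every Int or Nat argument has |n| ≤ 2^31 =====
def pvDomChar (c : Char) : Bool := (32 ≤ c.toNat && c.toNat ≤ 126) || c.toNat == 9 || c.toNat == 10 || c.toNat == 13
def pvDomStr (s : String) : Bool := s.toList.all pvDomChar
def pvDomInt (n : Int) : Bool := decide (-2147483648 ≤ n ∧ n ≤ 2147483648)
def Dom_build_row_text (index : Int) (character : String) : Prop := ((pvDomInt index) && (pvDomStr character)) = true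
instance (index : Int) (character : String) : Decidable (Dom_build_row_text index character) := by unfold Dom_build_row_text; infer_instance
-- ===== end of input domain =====

-- B replaces A's 9-step loop with a closed-form string expression (same return values; objective: simpler).



-- ===== PORT A =====
-- literal port of A: fold over range(9), per-step equality test on the index
def build_row_text (index : Int) (character : String) : String :=
  (List.foldl
    (fun ans i => if i ≠ index then ans ++ "| " else ans ++ ("|" ++ character))
    "" (PySem.List.pyRange 0 9 1)) ++ "|"

-- ===== PORT B =====
-- B: closed-form string arithmetic, no loop ("| " * n ported as repSeg n)
def repSeg : Nat → String
  | 0 => ""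
  | n + 1 => "| " ++ repSeg n

def build_row_text_alt (index : Int) (character : String) : String :=
  if 0 ≤ index ∧ index < 9 then
    repSeg index.toNat ++ "|" ++ character ++ repSeg (8 - index.toNat) ++ "|"
  else
    repSeg 9 ++ "|"

-- ===== PRECONDITION & SPEC =====
def Spec_build_row_text (index : Int) (character : String) (out : String) : Prop := out = build_row_text_alt index character
instance (index : Int) (character : String) (out : String) : Decidable (Spec_build_row_text index character out) := by unfold Spec_build_row_text; infer_instance

-- ===== CLAIM (what is proved, stated in full; the proofs are below) =====
def Claim_equal_build_row_text : Prop := ∀ (index : Int) (character : String), Dom_build_row_text index character → Spec_build_row_text index character (build_row_text index character)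

-- ===== LEMMAS AND PROOFS =====
theorem pv_range9 : PySem.List.pyRange 0 9 1 = [0,1,2,3,4,5,6,7,8] := by decide

-- ===== VERDICT (by name: the statement is the Claim_ definition above) =====
theorem build_row_text_spec : Claim_equal_build_row_text := by
  intro index character _
  unfold Spec_build_row_text build_row_text build_row_text_alt
  rw [pv_range9]
  by_cases h0 : index = 0
  · subst h0; simp [repSeg, ← String.append_assoc] <;> simp [String.append_assoc]
  · by_cases h1 : index = 1
    · subst h1; simp [repSeg, ← String.append_assoc] <;> simp [String.append_assoc]
    · by_cases h2 : index = 2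
      · subst h2; simp [repSeg, ← String.append_assoc] <;> simp [String.append_assoc]
      · by_cases h3 : index = 3
        · subst h3; simp [repSeg, ← String.append_assoc] <;> simp [String.append_assoc]
        · by_cases h4 : index = 4
          · subst h4; simp [repSeg, ← String.append_assoc] <;> simp [String.append_assoc]
          · by_cases h5 : index = 5
            · subst h5; simp [repSeg, ← String.append_assoc] <;> simp [String.append_assoc]
            · by_cases h6 : index = 6
              · subst h6; simp [repSeg, ← String.append_assoc] <;> simp [String.append_assoc]
              · by_cases h7 : index = 7
                · subst h7; simp [repSeg, ← String.append_assoc] <;> simp [String.append_assoc]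
                · by_cases h8 : index = 8
                  · subst h8; simp [repSeg, ← String.append_assoc] <;> simp [String.append_assoc]
                  · have hout : ¬ (0 ≤ index ∧ index < 9) := by
                      rintro ⟨hl, hr⟩; interval_cases index <;> simp_all
                    rw [if_neg hout]
                    simp only [List.foldl]
                    rw [if_pos (by omega : (0:Int) ≠ index), if_pos (by omega : (1:Int) ≠ index),
                        if_pos (by omega : (2:Int) ≠ index), if_pos (by omega : (3:Int) ≠ index),
                        if_pos (by omega : (4:Int) ≠ index), if_pos (by omega : (5:Int) ≠ index),
                        if_pos (by omega : (6:Int) ≠ index), if_pos (by omega : (7:Int) ≠ index),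
                        if_pos (by omega : (8:Int) ≠ index)]
                    simp [repSeg]
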